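-- pv_equiv track=rewrite | github.com/Ashiq-am/Path-of-Python | 3.Data Types/Arrays Set 1 and Set 2/Prefix/Maximum sum of pairs that are at least K distance apart in an array/Maximum sum of pairs that are at least K distance apart in an array.py | getMaxPairSum
-- ===== SOURCE A (Python) =====
-- def getMaxPairSum(arr, N, K):
--     # Stores the prefix maximum array
--     preMax = [0] * N
--
--     # Base Case
--     preMax[0] = arr[0]
--
--     # Traverse the array and update
--     # the maximum value upto index i
--     for i in range(1, N):
--         preMax[i] = max(preMax[i - 1], arr[i])
--
--     # Stores the maximum sum of pairs
--     res = -10 ** 8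
--
--     # Iterate over the range [K, N]
--     for i in range(K, N):
--         # Find the maximum value of
--         # the sum of valid pairs
--         res = max(res, arr[i] + preMax[i - K])
--
--     # Return the resultant sum
--     return res
-- ===== SOURCE B (Python) =====
-- def getMaxPairSum(arr, N, K):
--     # Single streaming pass: runningMax tracks max(arr[0..i-K]) in O(1) space,
--     # replacing A's preMax table.
--     res = -10 ** 8
--     runningMax = arr[0]
--     for i in range(K, N):
--         if i - K >= 1:
--             runningMax = max(runningMax, arr[i - K])
--         res = max(res, arr[i] + runningMax)
--     return res
-- ===== Notes on version B (the rewrite author's own statement) =====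
-- stated objective: simpler
-- what changed: Replaces A's preMax table (built in a first pass, indexed in a second) with a single streaming pass that keeps one runningMax scalar equal to max(arr[0..i-K]), using O(1) extra space.
import Mathlib
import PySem

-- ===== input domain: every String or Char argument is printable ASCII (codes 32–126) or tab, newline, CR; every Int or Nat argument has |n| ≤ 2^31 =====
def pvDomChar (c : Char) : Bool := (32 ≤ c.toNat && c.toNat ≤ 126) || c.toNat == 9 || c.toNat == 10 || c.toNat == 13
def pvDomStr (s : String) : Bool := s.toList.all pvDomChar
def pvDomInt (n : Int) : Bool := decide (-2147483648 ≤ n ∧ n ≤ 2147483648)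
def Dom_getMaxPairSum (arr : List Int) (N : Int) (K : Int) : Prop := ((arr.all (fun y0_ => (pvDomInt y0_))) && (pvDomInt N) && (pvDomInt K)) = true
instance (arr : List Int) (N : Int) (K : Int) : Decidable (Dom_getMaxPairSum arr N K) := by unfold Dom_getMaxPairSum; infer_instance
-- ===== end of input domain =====

-- B replaces A's prefix-maximum table with a single streaming pass keeping one
-- running maximum (O(1) extra space); objective: simpler.

-- ===== PORT A =====
-- literal transliteration of A: build preMax table, then scan pairs
def getMaxPairSum (arr : List Int) (N : Int) (K : Int) : Int :=
  let preMax0 : List Int := List.replicate N.toNat 0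
  let preMax0 := PySem.List.pySetD preMax0 0 (PySem.List.pyGetD arr 0 0)
  let preMax := (PySem.List.pyRange 1 N 1).foldl
    (fun pm i =>
      PySem.List.pySetD pm i (max (PySem.List.pyGetD pm (i - 1) 0) (PySem.List.pyGetD arr i 0)))
    preMax0
  (PySem.List.pyRange K N 1).foldl
    (fun res i => max res (PySem.List.pyGetD arr i 0 + PySem.List.pyGetD preMax (i - K) 0))
    (-(10 ^ 8))

-- ===== PORT B =====
-- literal transliteration of B: one pass with state (res, runningMax)
def getMaxPairSum_alt (arr : List Int) (N : Int) (K : Int) : Int :=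
  let st := (PySem.List.pyRange K N 1).foldl
    (fun (s : Int × Int) i =>
      let runningMax := if 1 ≤ i - K then max s.2 (PySem.List.pyGetD arr (i - K) 0) else s.2
      (max s.1 (PySem.List.pyGetD arr i 0 + runningMax), runningMax))
    (-(10 ^ 8), PySem.List.pyGetD arr 0 0)
  st.1

-- ===== PRECONDITION & SPEC =====
-- Pre_ excludes exactly the inputs where A raises: N ≤ 0 or N > len(arr)
-- (IndexError on preMax[0]=arr[0] or arr[i]) and K < 0 (negative i-K walks past
-- the end of preMax: IndexError).
def Pre_getMaxPairSum (arr : List Int) (N : Int) (K : Int) : Prop :=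
  1 ≤ N ∧ N ≤ arr.length ∧ 0 ≤ K
instance (arr : List Int) (N : Int) (K : Int) : Decidable (Pre_getMaxPairSum arr N K) := by
  unfold Pre_getMaxPairSum; infer_instance

def pvWitness_getMaxPairSum : List Int × Int × Int := ([3, -1, 4, 1], 4, 2)

def Spec_getMaxPairSum (arr : List Int) (N : Int) (K : Int) (out : Int) : Prop := out = getMaxPairSum_alt arr N K
instance (arr : List Int) (N : Int) (K : Int) (out : Int) : Decidable (Spec_getMaxPairSum arr N K out) := by unfold Spec_getMaxPairSum; infer_instance

-- ===== CLAIM (what is proved, stated in full; the proofs are below) =====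
def Claim_equal_getMaxPairSum : Prop := ∀ (arr : List Int) (N : Int) (K : Int), Dom_getMaxPairSum arr N K → Pre_getMaxPairSum arr N K → Spec_getMaxPairSum arr N K (getMaxPairSum arr N K)

-- ===== LEMMAS AND PROOFS =====

-- prefix maximum of arr[0..j]
def pmax (arr : List Int) : Nat → Int
  | 0 => PySem.List.pyGetD arr 0 0
  | j + 1 => max (pmax arr j) (PySem.List.pyGetD arr ((j : Int) + 1) 0)

-- the common result after t iterations of the pair scan
def resAcc (arr : List Int) (K : Int) : Nat → Int
  | 0 => -(10 ^ 8)
  | t + 1 => max (resAcc arr K t) (PySem.List.pyGetD arr (K + t) 0 + pmax arr t)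

theorem buildA (arr : List Int) (N : Int) (hN : 1 ≤ N) (m : Nat) (hm : (m : Int) + 1 ≤ N) :
    (((PySem.List.pyRange 1 (1 + m) 1).foldl
      (fun pm i =>
        PySem.List.pySetD pm i (max (PySem.List.pyGetD pm (i - 1) 0) (PySem.List.pyGetD arr i 0)))
      (PySem.List.pySetD (List.replicate N.toNat 0) 0 (PySem.List.pyGetD arr 0 0))).length = N.toNat)
    ∧ ∀ j : Nat, j ≤ m →
      PySem.List.pyGetD ((PySem.List.pyRange 1 (1 + m) 1).foldl
        (fun pm i =>
          PySem.List.pySetD pm i (max (PySem.List.pyGetD pm (i - 1) 0) (PySem.List.pyGetD arr i 0)))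
        (PySem.List.pySetD (List.replicate N.toNat 0) 0 (PySem.List.pyGetD arr 0 0))) (j : Int) 0
      = pmax arr j := by
  induction m with
  | zero =>
    rw [show ((1:Int) + (0:Nat)) = 1 by simp, PySem.List.pyRange_one_eq_nil (le_refl 1)]
    obtain ⟨n, hn⟩ : ∃ n, N.toNat = n + 1 := ⟨N.toNat - 1, by omega⟩
    rw [List.foldl_nil, PySem.List.pySetD_of_nonneg _ _ (le_refl 0), hn]
    constructor
    · simp
    · intro j hj
      interval_cases j
      simp [List.replicate_succ, pmax]
  | succ m ih =>
    have hm' : (m : Int) + 1 ≤ N := by push_cast at hm; omega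
    obtain ⟨ihlen, ihget⟩ := ih hm'
    rw [show ((1:Int) + (↑(m+1)) : Int) = (1 + m) + 1 by push_cast; ring,
        PySem.List.pyRange_one_succ_right (by omega), List.foldl_append]
    simp only [List.foldl_cons, List.foldl_nil]
    set L := (PySem.List.pyRange 1 (1 + (m:Int)) 1).foldl
      (fun pm i =>
        PySem.List.pySetD pm i (max (PySem.List.pyGetD pm (i - 1) 0) (PySem.List.pyGetD arr i 0)))
      (PySem.List.pySetD (List.replicate N.toNat 0) 0 (PySem.List.pyGetD arr 0 0)) with hL
    have hidx : ((1:Int) + (m:Int)) = ((m + 1 : Nat) : Int) := by push_cast; ring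
    have harg : ((1:Int) + (m:Int)) - 1 = ((m : Nat) : Int) := by ring
    have hlt : m + 1 < L.length := by rw [ihlen]; omega
    rw [harg, ihget m (le_refl m), hidx]
    have hval : max (pmax arr m) (PySem.List.pyGetD arr ((m+1 : Nat) : Int) 0) = pmax arr (m+1) := by
      simp only [pmax]
      norm_num
    constructor
    · rw [PySem.List.length_pySetD, ihlen]
    · intro j hj
      rw [PySem.List.pyGetD_pySetD_natCast _ _ _ _ _ hlt]
      by_cases hje : j = m + 1
      · subst hje
        rw [if_pos (by norm_num), hval]
      · rw [if_neg hje, ihget j (by omega)]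

theorem foldB (arr : List Int) (K : Int) (t : Nat) :
    (PySem.List.pyRange K (K + t) 1).foldl
      (fun (s : Int × Int) i =>
        let runningMax := if 1 ≤ i - K then max s.2 (PySem.List.pyGetD arr (i - K) 0) else s.2
        (max s.1 (PySem.List.pyGetD arr i 0 + runningMax), runningMax))
      (-(10 ^ 8), PySem.List.pyGetD arr 0 0)
    = (resAcc arr K t, pmax arr (t - 1)) := by
  induction t with
  | zero =>
    rw [show K + (0:Nat) = K by simp, PySem.List.pyRange_one_eq_nil (le_refl K)]
    simp [resAcc, pmax]
  | succ t ih =>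
    rw [show (K + (↑(t+1)) : Int) = (K + t) + 1 by push_cast; ring,
        PySem.List.pyRange_one_succ_right (by omega), List.foldl_append, ih]
    simp only [List.foldl_cons, List.foldl_nil]
    have harg : (K + (t:Int)) - K = (t : Int) := by ring
    rw [harg]
    rcases Nat.eq_zero_or_pos t with h0 | hpos
    · subst h0
      norm_num [resAcc, pmax]
    · have hc : (1:Int) ≤ (t:Int) := by exact_mod_cast hpos
      have ht1 : t - 1 + 1 = t := Nat.succ_pred_eq_of_pos hpos
      simp only [if_pos hc]
      have hrm : max (pmax arr (t-1)) (PySem.List.pyGetD arr (t:Int) 0) = pmax arr t := by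
        conv_rhs => rw [← ht1]
        simp only [pmax]
        have hcast : ((t - 1 : Nat) : Int) + 1 = (t : Int) := by omega
        rw [hcast]
      rw [hrm]
      simp [resAcc]

theorem foldA (arr : List Int) (N K : Int) (hK : 0 ≤ K)
    (preMax : List Int)
    (hchar : ∀ j : Nat, (j : Int) < N → PySem.List.pyGetD preMax (j : Int) 0 = pmax arr j)
    (t : Nat) (ht : K + t ≤ N) :
    (PySem.List.pyRange K (K + t) 1).foldl
      (fun res i => max res (PySem.List.pyGetD arr i 0 + PySem.List.pyGetD preMax (i - K) 0))
      (-(10 ^ 8))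
    = resAcc arr K t := by
  induction t with
  | zero =>
    rw [show K + (0:Nat) = K by simp, PySem.List.pyRange_one_eq_nil (le_refl K)]
    simp [resAcc]
  | succ t ih =>
    rw [show (K + (↑(t+1)) : Int) = (K + t) + 1 by push_cast; ring,
        PySem.List.pyRange_one_succ_right (by omega), List.foldl_append,
        ih (by push_cast at ht ⊢; omega)]
    simp only [List.foldl_cons, List.foldl_nil]
    have harg : (K + (t:Int)) - K = (t : Int) := by ring
    rw [harg, hchar t (by push_cast at ht; omega)]
    simp [resAcc]

-- ===== VERDICT (by name: the statement is the Claim_ definition above) =====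
theorem getMaxPairSum_spec : Claim_equal_getMaxPairSum := by
  intro arr N K _ hpre
  obtain ⟨hN, hNlen, hK⟩ := hpre
  unfold Spec_getMaxPairSum
  by_cases hKN : N ≤ K
  · unfold getMaxPairSum getMaxPairSum_alt
    rw [PySem.List.pyRange_one_eq_nil hKN]
    simp
  · push Not at hKN
    set m := (N - 1).toNat with hm
    have hNm : N = 1 + (m : Int) := by omega
    set t := (N - K).toNat with ht
    have hNt : N = K + (t : Int) := by omega
    obtain ⟨hlen, hget⟩ := buildA arr N hN m (by omega)
    have hA : getMaxPairSum arr N K = resAcc arr K t := by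
      unfold getMaxPairSum
      simp only []
      have hrange1 : PySem.List.pyRange 1 N 1 = PySem.List.pyRange 1 (1 + (m:Int)) 1 := by
        rw [← hNm]
      have hrange2 : PySem.List.pyRange K N 1 = PySem.List.pyRange K (K + (t:Int)) 1 := by
        rw [← hNt]
      rw [hrange1, hrange2]
      exact foldA arr N K hK _ (fun j hj => hget j (by omega)) t (by omega)
    have hB : getMaxPairSum_alt arr N K = resAcc arr K t := by
      unfold getMaxPairSum_alt
      simp only []
      have hrange2 : PySem.List.pyRange K N 1 = PySem.List.pyRange K (K + (t:Int)) 1 := by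
        rw [← hNt]
      rw [hrange2, foldB arr K t]
    rw [hA, hB]
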